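-- pv_equiv track=rewrite | github.com/pgadmin-org/pgadmin4 | web/pgadmin/tools/schema_diff/compare.py | parce_acl
-- ===== SOURCE A (Python) =====
-- import copy
--
-- def parce_acl(source, target):
--     key = 'acl'
--
--     if 'datacl' in source:
--         key = 'datacl'
--     elif 'relacl' in source:
--         key = 'relacl'
--
--     tmp_source = source[key] if\
--         key in source and source[key] is not None else []
--     tmp_target = copy.deepcopy(target[key]) if\
--         key in target and target[key] is not None else []
--
--     diff = {'added': [], 'deleted': []}
--     for acl in tmp_source:
--         if acl in tmp_target:
--             tmp_target.remove(acl)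
--         elif acl not in tmp_target:
--             diff['added'].append(acl)
--     diff['deleted'] = tmp_target
--
--     return {key: diff}
-- ===== SOURCE B (Python) =====
-- import copy
--
-- def parce_acl(source, target):
--     key = next((k for k in ('datacl', 'relacl') if k in source), 'acl')
--     src = source.get(key) or []
--     tgt = target.get(key) or []
--
--     def extras(xs, ys):
--         # occurrences of xs beyond the multiplicity available in ys, in xs order
--         quota = {}
--         for y in ys:
--             quota[y] = quota.get(y, 0) + 1
--         out = []
--         seen = {}
--         for x in xs:
--             seen[x] = seen.get(x, 0) + 1
--             if seen[x] > quota.get(x, 0):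
--                 out.append(x)
--         return out
--
--     return {key: {'added': extras(src, tgt),
--                   'deleted': [copy.deepcopy(x) for x in extras(tgt, src)]}}
-- ===== Notes on version B (the rewrite author's own statement) =====
-- stated objective: faster
-- what changed: A repeatedly scans and mutates the (copied) target list, doing a membership test plus list.remove per source entry; B never mutates a list: it builds a total-count quota dict per side once, then emits each occurrence whose running occurrence number exceeds the other side's quota.
import Mathlib
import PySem

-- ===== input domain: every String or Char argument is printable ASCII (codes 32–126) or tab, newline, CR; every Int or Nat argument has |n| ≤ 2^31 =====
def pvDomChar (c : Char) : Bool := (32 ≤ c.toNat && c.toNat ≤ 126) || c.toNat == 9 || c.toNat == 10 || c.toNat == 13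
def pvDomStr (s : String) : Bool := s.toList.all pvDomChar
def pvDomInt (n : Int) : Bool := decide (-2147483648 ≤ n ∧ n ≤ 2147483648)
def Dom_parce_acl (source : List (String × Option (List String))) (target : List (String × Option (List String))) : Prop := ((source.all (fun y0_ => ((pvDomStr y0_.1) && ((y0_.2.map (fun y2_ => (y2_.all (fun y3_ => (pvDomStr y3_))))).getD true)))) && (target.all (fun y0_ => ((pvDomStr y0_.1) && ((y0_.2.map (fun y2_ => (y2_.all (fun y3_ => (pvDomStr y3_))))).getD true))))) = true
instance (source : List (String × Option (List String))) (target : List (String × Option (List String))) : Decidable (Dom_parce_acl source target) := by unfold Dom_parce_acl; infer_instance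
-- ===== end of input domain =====

-- B replaces A's membership-test/remove loop over a mutable copy of the target list by a
-- quota test: an occurrence of x is surplus iff its running occurrence number exceeds the
-- other list's total count of x; return value only (A mutates no argument: it deep-copies
-- target[key] before removing from the copy).

-- ===== PORT A =====
-- A's loop body: if acl in tmp_target: tmp_target.remove(acl) else: added.append(acl)
def aclStepA (st : List String × List String) (acl : String) : List String × List String :=
  if acl ∈ st.1 then ((PySem.List.remove? st.1 acl).getD st.1, st.2)
  else (st.1, st.2 ++ [acl])

def parce_acl (source : List (String × Option (List String))) (target : List (String × Option (List String))) : List (String × List (String × List String)) :=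
  let key := if (PySem.Dict.mk source).contains "datacl" then "datacl"
             else if (PySem.Dict.mk source).contains "relacl" then "relacl" else "acl"
  let tmp_source := match (PySem.Dict.mk source).get? key with | some (some v) => v | _ => []
  -- copy.deepcopy is the identity on immutable values
  let tmp_target := match (PySem.Dict.mk target).get? key with | some (some v) => v | _ => []
  let r := tmp_source.foldl aclStepA (tmp_target, [])
  [(key, [("added", r.2), ("deleted", r.1)])]

-- ===== PORT B =====
-- Source B's quota-building loop: quota[y] = quota.get(y, 0) + 1
def buildQuota (ys : List String) (quota : PySem.Dict String Int) : PySem.Dict String Int :=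
  match ys with
  | [] => quota
  | y :: rest => buildQuota rest (quota.insert y (quota.getD y 0 + 1))

-- Source B's scan loop: seen[x] += 1; if seen[x] > quota.get(x, 0): out.append(x)
def scanExtras (xs : List String) (quota seen : PySem.Dict String Int) (out : List String) : List String :=
  match xs with
  | [] => out
  | x :: rest =>
      let s := seen.getD x 0 + 1
      if s > quota.getD x 0 then scanExtras rest quota (seen.insert x s) (out ++ [x])
      else scanExtras rest quota (seen.insert x s) out

-- Source B's helper: extras(xs, ys) = occurrences of xs beyond ys's multiplicity
def extras (xs ys : List String) : List String :=
  scanExtras xs (buildQuota ys PySem.Dict.empty) PySem.Dict.empty []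

def parce_acl_alt (source : List (String × Option (List String))) (target : List (String × Option (List String))) : List (String × List (String × List String)) :=
  let key := (["datacl", "relacl"].find? (fun k => (PySem.Dict.mk source).contains k)).getD "acl"
  -- Source B: src = source.get(key) or []  ('or' sends both None and [] to [])
  let src := ((PySem.Dict.mk source).getD key none).getD []
  let tgt := ((PySem.Dict.mk target).getD key none).getD []
  -- copy.deepcopy on the deleted entries is the identity on immutable values
  [(key, [("added", extras src tgt), ("deleted", extras tgt src)])]

-- ===== PRECONDITION & SPEC =====
def Spec_parce_acl (source : List (String × Option (List String))) (target : List (String × Option (List String))) (out : List (String × List (String × List String))) : Prop := out = parce_acl_alt source target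
instance (source : List (String × Option (List String))) (target : List (String × Option (List String))) (out : List (String × List (String × List String))) : Decidable (Spec_parce_acl source target out) := by unfold Spec_parce_acl; infer_instance

-- ===== CLAIM (what is proved, stated in full; the proofs are below) =====
def Claim_equal_parce_acl : Prop := ∀ (source : List (String × Option (List String))) (target : List (String × Option (List String))), Dom_parce_acl source target → Spec_parce_acl source target (parce_acl source target)

-- ===== LEMMAS AND PROOFS =====

-- abstract surplus pass over a pure count function: drop x while c x > 0 (decrementing), else keep it
def runPure : List String → (String → Int) → List String
  | [], _ => []
  | x :: rest, c =>
      if c x > 0 then runPure rest (fun v => if v = x then c v - 1 else c v)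
      else x :: runPure rest c

theorem runPure_nonpos (l : List String) (c : String → Int) (h : ∀ v, c v ≤ 0) :
    runPure l c = l := by
  induction l with
  | nil => rfl
  | cons x rest ih =>
      simp only [runPure]
      rw [if_neg (by have := h x; omega)]
      rw [ih]

theorem runPure_bump (t : List String) (x : String) (c : String → Int) (hc : ∀ v, 0 ≤ c v) :
    runPure t (fun v => if v = x then c v + 1 else c v)
      = runPure (if x ∈ t then t.erase x else t) c := by
  induction t generalizing c with
  | nil => simp [runPure]
  | cons y rest ih =>
      by_cases hyx : y = x
      · subst hyx
        simp only [runPure, List.mem_cons, true_or, if_pos, List.erase_cons_head]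
        rw [if_pos (by have := hc y; omega)]
        have : (fun v => if v = y then (if v = y then c v + 1 else c v) - 1 else if v = y then c v + 1 else c v) = c := by
          funext v; by_cases hv : v = y <;> simp [hv]
        rw [this]
      · have herase : (if x ∈ y :: rest then (y :: rest).erase x else y :: rest)
            = y :: (if x ∈ rest then rest.erase x else rest) := by
          by_cases hm : x ∈ rest
          · rw [if_pos (List.mem_cons_of_mem y hm), if_pos hm,
                List.erase_cons_tail (by simp [hyx])]
          · have hnm : x ∉ y :: rest := by
              intro h
              rcases List.mem_cons.mp h with h | h
              · exact hyx h.symm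
              · exact hm h
            rw [if_neg hnm, if_neg hm]
        rw [herase]
        simp only [runPure, if_neg hyx]
        by_cases hcy : c y > 0
        · rw [if_pos hcy, if_pos hcy]
          have harg : (fun v => if v = y then (if v = x then c v + 1 else c v) - 1 else if v = x then c v + 1 else c v)
              = (fun v => if v = x then (if v = y then c v - 1 else c v) + 1 else (if v = y then c v - 1 else c v)) := by
            funext v
            have hxy : ¬ x = y := fun h => hyx h.symm
            by_cases hvx : v = x
            · have hvy : ¬ v = y := by intro h; rw [h] at hvx; exact hyx hvx
              simp [hvx, hxy]
            · by_cases hvy : v = y <;> simp [hvx, hvy, hyx]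
          rw [harg, ih (fun v => if v = y then c v - 1 else c v)
                (by intro v; by_cases hv : v = y <;> simp [hv] <;> [omega; exact hc v])]
        · rw [if_neg hcy, if_neg hcy, ih c hc]

-- runPure only looks at where the counts are positive
theorem runPure_congR (l : List String) (c c' : String → Int)
    (h : ∀ v, (0 < c v ∧ c v = c' v) ∨ (c v ≤ 0 ∧ c' v ≤ 0)) :
    runPure l c = runPure l c' := by
  induction l generalizing c c' with
  | nil => rfl
  | cons x rest ih =>
      simp only [runPure]
      rcases h x with ⟨hp, he⟩ | ⟨hn, hn'⟩
      · rw [if_pos hp, if_pos (he ▸ hp)]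
        apply ih
        intro v
        rcases h v with ⟨hp2, he2⟩ | ⟨hn2, hn2'⟩
        · by_cases hv : v = x
          · subst hv
            by_cases h1 : 0 < c v - 1
            · exact Or.inl ⟨by simpa using h1, by simp [he2]⟩
            · exact Or.inr ⟨by simpa using h1, by simp; omega⟩
          · exact Or.inl ⟨by simp [hv, hp2], by simp [hv, he2]⟩
        · by_cases hv : v = x <;> simp [hv] <;> omega
      · rw [if_neg (by omega), if_neg (by omega), ih c c' h]

-- A's loop: the accumulated 'added' list seen through target counts
theorem foldA_snd (l : List String) (t acc : List String) :
    (l.foldl aclStepA (t, acc)).2 = acc ++ runPure l (fun v => (t.count v : Int)) := by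
  induction l generalizing t acc with
  | nil => simp [runPure]
  | cons x rest ih =>
      simp only [List.foldl_cons, aclStepA, runPure]
      by_cases hm : x ∈ t
      · rw [if_pos hm, if_pos (by exact_mod_cast List.count_pos_iff.mpr hm)]
        rw [PySem.List.remove?_eq_some_erase t x hm]
        simp only [Option.getD_some]
        rw [ih]
        congr 1
        congr 1
        funext v
        by_cases hv : v = x
        · subst hv
          have := List.count_pos_iff.mpr hm
          simp [List.count_erase_self]
          omega
        · simp [hv, List.count_erase_of_ne hv]
      · rw [if_neg hm, if_neg (by simp [List.count_eq_zero_of_not_mem hm])]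
        rw [ih]
        simp

-- A's loop: the remaining target list equals the surplus pass over source counts
theorem foldA_fst (l : List String) (t acc : List String) :
    (l.foldl aclStepA (t, acc)).1 = runPure t (fun v => (l.count v : Int)) := by
  induction l generalizing t acc with
  | nil =>
      simp only [List.foldl_nil]
      rw [runPure_nonpos _ _ (by intro v; simp)]
  | cons x rest ih =>
      simp only [List.foldl_cons, aclStepA]
      by_cases hm : x ∈ t
      · rw [if_pos hm]
        rw [PySem.List.remove?_eq_some_erase t x hm]
        simp only [Option.getD_some]
        rw [ih]
        have : (fun v => (((x :: rest).count v : Nat) : Int))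
            = (fun v => if v = x then ((rest.count v : Nat) : Int) + 1 else ((rest.count v : Nat) : Int)) := by
          funext v; by_cases hv : v = x <;> simp [hv, Ne.symm]
        rw [this, runPure_bump t x _ (by intro v; positivity), if_pos hm]
      · rw [if_neg hm]
        rw [ih]
        have : (fun v => (((x :: rest).count v : Nat) : Int))
            = (fun v => if v = x then ((rest.count v : Nat) : Int) + 1 else ((rest.count v : Nat) : Int)) := by
          funext v; by_cases hv : v = x <;> simp [hv, Ne.symm]
        rw [this, runPure_bump t x _ (by intro v; positivity), if_neg hm]

-- B's quota loop is a left fold, so the PySem counting lemma applies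
theorem buildQuota_getD (ys : List String) (d : PySem.Dict String Int) (v : String) :
    (buildQuota ys d).getD v 0 = d.getD v 0 + (ys.count v : Int) := by
  have heq : ∀ (l : List String) (d : PySem.Dict String Int),
      buildQuota l d = l.foldl (fun d x => d.insert x (d.getD x 0 + 1)) d := by
    intro l
    induction l with
    | nil => intro d; rfl
    | cons x rest ih => intro d; simp only [buildQuota, List.foldl_cons]; exact ih _
  rw [heq, PySem.Dict.getD_foldl_insert_add_one]

-- B's scan loop seen through the remaining quota (quota minus seen)
theorem scanExtras_eq (xs : List String) (quota seen : PySem.Dict String Int) (out : List String) :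
    scanExtras xs quota seen out
      = out ++ runPure xs (fun v => quota.getD v 0 - seen.getD v 0) := by
  induction xs generalizing seen out with
  | nil => simp [scanExtras, runPure]
  | cons x rest ih =>
      simp only [scanExtras, runPure]
      by_cases hs : seen.getD x 0 + 1 > quota.getD x 0
      · rw [if_pos hs, if_neg (by omega), ih]
        have : (fun v => quota.getD v 0 - (seen.insert x (seen.getD x 0 + 1)).getD v 0)
            = (fun v => if v = x then (quota.getD v 0 - seen.getD v 0) - 1 else quota.getD v 0 - seen.getD v 0) := by
          funext v; rw [PySem.Dict.getD_insert]; by_cases hv : v = x <;> simp [hv] <;> try omega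
        rw [this, runPure_congR rest _ (fun v => quota.getD v 0 - seen.getD v 0)
              (by intro v; by_cases hv : v = x <;> simp [hv] <;> omega)]
        simp
      · rw [if_neg hs, if_pos (by omega), ih]
        have : (fun v => quota.getD v 0 - (seen.insert x (seen.getD x 0 + 1)).getD v 0)
            = (fun v => if v = x then (quota.getD v 0 - seen.getD v 0) - 1 else quota.getD v 0 - seen.getD v 0) := by
          funext v; rw [PySem.Dict.getD_insert]; by_cases hv : v = x <;> simp [hv] <;> try omega
        rw [this]

-- B's extras = the surplus pass over the other list's counts
theorem extras_eq (xs ys : List String) :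
    extras xs ys = runPure xs (fun v => (ys.count v : Int)) := by
  unfold extras
  rw [scanExtras_eq]
  simp only [List.nil_append]
  congr 1
  funext v
  rw [buildQuota_getD]
  simp [PySem.Dict.getD_empty]

-- the two key selections agree
theorem key_eq (source : List (String × Option (List String))) :
    ((["datacl", "relacl"].find? (fun k => (PySem.Dict.mk source).contains k)).getD "acl")
      = (if (PySem.Dict.mk source).contains "datacl" then "datacl"
         else if (PySem.Dict.mk source).contains "relacl" then "relacl" else "acl") := by
  by_cases h1 : (PySem.Dict.mk source).contains "datacl" <;>
    by_cases h2 : (PySem.Dict.mk source).contains "relacl" <;>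
      simp [List.find?, h1, h2]

-- the two value extractions agree
theorem extract_eq (d : List (String × Option (List String))) (key : String) :
    (((PySem.Dict.mk d).getD key none).getD [])
      = (match (PySem.Dict.mk d).get? key with | some (some v) => v | _ => []) := by
  rw [PySem.Dict.getD_eq_get?_getD]
  rcases h : (PySem.Dict.mk d).get? key with _ | o
  · rfl
  · rcases o with _ | v <;> rfl

-- ===== VERDICT (by name: the statement is the Claim_ definition above) =====
theorem parce_acl_spec : Claim_equal_parce_acl := by
  intro source target _
  unfold Spec_parce_acl parce_acl parce_acl_alt
  simp only [key_eq, extract_eq, foldA_snd, foldA_fst, extras_eq, List.nil_append]
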